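-- pv_equiv track=rewrite | github.com/soominnn/Algorithms | Programmers/베스트앨범.py | solution
-- ===== SOURCE A (Python) =====
-- def solution(genres, plays):
--     genres_total_plays = dict()
--     answer = []
--     # 장르별로 속한 노래 총합 수 구하기
--     for idx, genre in enumerate(genres):
--         try:
--             genres_total_plays[genre] += plays[idx]
--         except:
--             genres_total_plays[genre] = plays[idx]
--
--     # 가장 많은 곡이 속한 장르 구하기
--     many_plays_genres = sorted(list(genres_total_plays.items()), key = lambda x : x[1], reverse = True)
--
--
--     while many_plays_genres:
--         many_plays_genre = many_plays_genres[0][0]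
--         temp_genre_plays = []
--
--         # 장르 별 play 수 추출하기
--         for idx, genre in enumerate(genres):
--             if genre == many_plays_genre:
--                 temp_genre_plays.append([idx, plays[idx]])
--
--         # 정렬 및 장르별 2개 까지 제한
--         temp_genre_plays = sorted(temp_genre_plays, key = lambda x : x[1], reverse = True)[:2]
--
--
--         for genre_index in temp_genre_plays:
--             answer.append(genre_index[0])
--
--         many_plays_genres.pop(0)
--
--     return answer
-- ===== SOURCE B (Python) =====
-- def solution(genres, plays):
--     # One pass buckets songs by genre (and totals), then one sort of the genres
--     # and one sort per bucket: no rescan of the whole song list per genre.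
--     totals = {}
--     buckets = {}
--     for i, (g, p) in enumerate(zip(genres, plays)):
--         totals[g] = totals.get(g, 0) + p
--         buckets.setdefault(g, []).append((i, p))
--     answer = []
--     for g in sorted(totals, key=lambda k: totals[k], reverse=True):
--         for i, p in sorted(buckets[g], key=lambda t: t[1], reverse=True)[:2]:
--             answer.append(i)
--     return answer
-- ===== Notes on version B (the rewrite author's own statement) =====
-- stated objective: faster
-- what changed: Instead of re-scanning the whole song list once per genre inside the while-pop loop, B buckets songs by genre (and accumulates totals) in a single pass, then sorts the genres once by total and each bucket once, giving O(N log N) instead of O(G*N + N log N).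
import Mathlib
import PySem

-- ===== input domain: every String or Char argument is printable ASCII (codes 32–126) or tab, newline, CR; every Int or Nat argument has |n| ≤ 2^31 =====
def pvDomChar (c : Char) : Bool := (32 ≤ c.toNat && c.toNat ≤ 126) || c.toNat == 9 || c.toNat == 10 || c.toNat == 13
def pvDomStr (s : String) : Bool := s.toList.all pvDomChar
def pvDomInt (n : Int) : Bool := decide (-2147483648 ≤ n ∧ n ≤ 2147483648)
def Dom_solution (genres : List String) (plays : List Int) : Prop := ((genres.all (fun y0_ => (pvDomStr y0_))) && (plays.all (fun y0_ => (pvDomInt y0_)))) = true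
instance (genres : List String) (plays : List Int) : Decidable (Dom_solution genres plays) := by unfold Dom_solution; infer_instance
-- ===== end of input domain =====

-- B buckets songs by genre (and totals) in one pass, then sorts genres and buckets once,
-- replacing A's per-genre rescan of the whole song list (objective: faster).

-- ===== PORT A =====
-- plays[idx] is ported as pyGetD plays idx 0; Pre_solution guarantees idx is in range,
-- exactly where the Python A does not raise.
def solution (genres : List String) (plays : List Int) : List Int :=
  let genresTotalPlays : PySem.Dict String Int :=
    (PySem.List.enumerate genres 0).foldl (fun d ip =>
      match d.get? ip.2 with
      | some v => d.insert ip.2 (v + PySem.List.pyGetD plays ip.1 0)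
      | none   => d.insert ip.2 (PySem.List.pyGetD plays ip.1 0)) PySem.Dict.empty
  let manyPlaysGenres := PySem.List.sorted genresTotalPlays.items (fun x => x.2) true
  -- 'while many_plays_genres: … pop(0)' consumes the sorted list front to back = a fold over it
  manyPlaysGenres.foldl (fun answer gp =>
    let tempGenrePlays := (PySem.List.enumerate genres 0).foldl (fun acc ip =>
      if ip.2 == gp.1 then acc ++ [(ip.1, PySem.List.pyGetD plays ip.1 0)] else acc) []
    let tempGenrePlays2 := PySem.List.slice (PySem.List.sorted tempGenrePlays (fun x => x.2) true) none (some 2)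
    tempGenrePlays2.foldl (fun a gi => a ++ [gi.1]) answer) []

-- ===== PORT B =====
def solution_alt (genres : List String) (plays : List Int) : List Int :=
  let st := (PySem.List.enumerate (genres.zip plays) 0).foldl
    (fun (st : PySem.Dict String Int × PySem.Dict String (List (Int × Int))) ix =>
      (st.1.insert ix.2.1 (st.1.getD ix.2.1 0 + ix.2.2),
       st.2.modify ix.2.1 [] (fun l => l ++ [(ix.1, ix.2.2)])))
    (PySem.Dict.empty, PySem.Dict.empty)
  let totals := st.1
  let buckets := st.2
  (PySem.List.sorted totals.keys (fun k => totals.getD k 0) true).foldl (fun answer g =>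
    (PySem.List.slice (PySem.List.sorted (buckets.getD g []) (fun t => t.2) true) none (some 2)).foldl
      (fun a t => a ++ [t.1]) answer) []

-- ===== PRECONDITION & SPEC =====
-- A evaluates plays[idx] for every index of genres (and raises IndexError past the end of
-- plays); Pre_ is exactly the inputs where A returns normally.
def Pre_solution (genres : List String) (plays : List Int) : Prop := genres.length ≤ plays.length
instance (genres : List String) (plays : List Int) : Decidable (Pre_solution genres plays) := by unfold Pre_solution; infer_instance
def pvWitness_solution : List String × List Int := (["rock", "pop", "rock"], [150, 600, 150])

def Spec_solution (genres : List String) (plays : List Int) (out : List Int) : Prop := out = solution_alt genres plays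
instance (genres : List String) (plays : List Int) (out : List Int) : Decidable (Spec_solution genres plays out) := by unfold Spec_solution; infer_instance

-- ===== CLAIM (what is proved, stated in full; the proofs are below) =====
def Claim_equal_solution : Prop := ∀ (genres : List String) (plays : List Int), Dom_solution genres plays → Pre_solution genres plays → Spec_solution genres plays (solution genres plays)

-- ===== LEMMAS AND PROOFS =====

-- A reads (idx, genre, plays[idx]); under Pre_ this is exactly enumerate(zip(genres, plays)).
theorem pv_enum_triple (genres : List String) (plays : List Int) :
    ∀ (s : Nat), s + genres.length ≤ plays.length →
    (PySem.List.enumerate genres (s : Int)).map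
        (fun ip => (ip.1, ip.2, PySem.List.pyGetD plays ip.1 0)) =
      (PySem.List.enumerate (genres.zip (plays.drop s)) (s : Int)).map
        (fun ix => (ix.1, ix.2.1, ix.2.2)) := by
  induction genres with
  | nil => intro s _; simp [PySem.List.enumerate_nil]
  | cons g t ih =>
    intro s hs
    have hslt : s < plays.length := by simp at hs; omega
    have hdrop : plays.drop s = plays[s] :: plays.drop (s + 1) :=
      List.drop_eq_getElem_cons hslt
    have hget : PySem.List.pyGetD plays (s : Int) 0 = plays[s] := by
      rw [PySem.List.pyGetD_of_nonneg plays 0 (by positivity)]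
      simp [List.getD_eq_getElem?_getD, hslt]
    have ih' := ih (s + 1) (by simp at hs ⊢; omega)
    push_cast at ih'
    rw [hdrop]
    simp only [PySem.List.enumerate_cons, List.zip_cons_cons, List.map_cons, hget]
    rw [ih']

theorem pv_sorted_map {α β κ : Type} [LinearOrder κ] (f : α → β) (keyA : α → κ) (keyB : β → κ)
    (hk : ∀ a, keyB (f a) = keyA a) (l : List α) (rev : Bool) :
    PySem.List.sorted (l.map f) keyB rev = (PySem.List.sorted l keyA rev).map f := by
  have hins : ∀ (x : α) (acc : List α) (bA : α → α → Bool) (bB : β → β → Bool),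
      (∀ a b, bB (f a) (f b) = bA a b) →
      PySem.List.insertBy bB (f x) (acc.map f) = (PySem.List.insertBy bA x acc).map f := by
    intro x acc bA bB hb
    induction acc with
    | nil => simp [PySem.List.insertBy]
    | cons y ys ihy =>
      simp only [List.map_cons, PySem.List.insertBy, hb]
      by_cases h : bA x y = true
      · simp [h]
      · simp [h, ihy]
  have main : ∀ (bA : α → α → Bool) (bB : β → β → Bool),
      (∀ a b, bB (f a) (f b) = bA a b) →
      ∀ (l : List α) (acc : List α),
      (l.map f).foldl (fun acc x => PySem.List.insertBy bB x acc) (acc.map f) =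
        (l.foldl (fun acc x => PySem.List.insertBy bA x acc) acc).map f := by
    intro bA bB hb l
    induction l with
    | nil => intro acc; simp
    | cons x xs ihx =>
      intro acc
      simp only [List.map_cons, List.foldl_cons]
      rw [hins x acc bA bB hb, ihx]
  cases rev with
  | false =>
    have := main (fun a b => decide (keyA a < keyA b)) (fun a b => decide (keyB a < keyB b))
      (by intro a b; simp [hk]) l []
    simpa [PySem.List.sorted] using this
  | true =>
    have := main (fun a b => decide (keyA b < keyA a)) (fun a b => decide (keyB b < keyB a))
      (by intro a b; simp [hk]) l []
    simpa [PySem.List.sorted] using this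


theorem pv_foldA_to_E {sigma : Type} (genres : List String) (plays : List Int)
    (h : sigma → Int × String × Int → sigma) (init : sigma)
    (hpre : genres.length ≤ plays.length) :
    (PySem.List.enumerate genres 0).foldl
        (fun acc ip => h acc (ip.1, ip.2, PySem.List.pyGetD plays ip.1 0)) init =
      (PySem.List.enumerate (genres.zip plays) 0).foldl
        (fun acc ix => h acc (ix.1, ix.2.1, ix.2.2)) init := by
  have he := pv_enum_triple genres plays 0 (by simpa)
  simp only [List.drop_zero, Nat.cast_zero] at he
  have l1 := List.foldl_map (f := fun (ip : Int × String) => (ip.1, ip.2, PySem.List.pyGetD plays ip.1 0))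
    (g := h) (l := PySem.List.enumerate genres 0) (init := init)
  have l2 := List.foldl_map (f := fun (ix : Int × (String × Int)) => (ix.1, ix.2.1, ix.2.2))
    (g := h) (l := PySem.List.enumerate (genres.zip plays) 0) (init := init)
  simp only [] at l1 l2
  rw [← l1, ← l2, he]

-- the try/except accumulation step is exactly 'd[g] = d.get(g, 0) + p'
theorem pv_step_eq (d : PySem.Dict String Int) (g : String) (p : Int) :
    (match d.get? g with
      | some v => d.insert g (v + p)
      | none   => d.insert g p) = d.insert g (d.getD g 0 + p) := by
  cases hd : d.get? g <;> simp [PySem.Dict.getD_eq_get?_getD, hd]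

-- ===== VERDICT (by name: the statement is the Claim_ definition above) =====
theorem solution_spec : Claim_equal_solution := by
  intro genres plays _ hpre
  unfold Pre_solution at hpre
  unfold Spec_solution solution solution_alt
  rw [PySem.List.foldl_prod_mk
    (f := fun (d : PySem.Dict String Int) (ix : Int × (String × Int)) =>
      d.insert ix.2.1 (d.getD ix.2.1 0 + ix.2.2))
    (g := fun (d : PySem.Dict String (List (Int × Int))) (ix : Int × (String × Int)) =>
      d.modify ix.2.1 [] (fun l => l ++ [(ix.1, ix.2.2)]))]
  simp only []
  have htot : List.foldl (fun (d : PySem.Dict String Int) ip =>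
        match d.get? ip.2 with
        | some v => d.insert ip.2 (v + PySem.List.pyGetD plays ip.1 0)
        | none => d.insert ip.2 (PySem.List.pyGetD plays ip.1 0)) PySem.Dict.empty
        (PySem.List.enumerate genres)
      = List.foldl (fun (d : PySem.Dict String Int) ix => d.insert ix.2.1 (d.getD ix.2.1 0 + ix.2.2))
        PySem.Dict.empty (PySem.List.enumerate (genres.zip plays)) := by
    have h1 := pv_foldA_to_E genres plays (fun (d : PySem.Dict String Int) x =>
      match d.get? x.2.1 with
      | some v => d.insert x.2.1 (v + x.2.2)
      | none => d.insert x.2.1 x.2.2) PySem.Dict.empty hpre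
    simp only [] at h1
    rw [h1]
    exact PySem.List.foldl_congr_mem _ _ _ _ (fun acc x _ => pv_step_eq acc x.2.1 x.2.2)
  have htemp : ∀ g : String,
      List.foldl (fun (acc : List (Int × Int)) ip =>
          if (ip.2 == g) = true then acc ++ [(ip.1, PySem.List.pyGetD plays ip.1 0)] else acc) []
        (PySem.List.enumerate genres)
      = (List.foldl (fun (d : PySem.Dict String (List (Int × Int))) ix =>
            d.modify ix.2.1 [] fun l => l ++ [(ix.1, ix.2.2)]) PySem.Dict.empty
          (PySem.List.enumerate (genres.zip plays))).getD g [] := by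
    intro g
    have h1 := pv_foldA_to_E genres plays (fun (acc : List (Int × Int)) x =>
      if x.2.1 == g then acc ++ [(x.1, x.2.2)] else acc) [] hpre
    simp only [] at h1
    rw [h1]
    have h2 := List.foldl_map (f := fun (ix : Int × (String × Int)) => (ix.2.1, (ix.1, ix.2.2)))
      (g := fun (d : PySem.Dict String (List (Int × Int))) p => d.modify p.1 [] fun l => l ++ [p.2])
      (l := PySem.List.enumerate (genres.zip plays)) (init := (PySem.Dict.empty : PySem.Dict String (List (Int × Int))))
    simp only [] at h2
    rw [← h2, PySem.Dict.getD_foldl_modify_append]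
    rw [PySem.List.foldl_append_if (p := fun ix : Int × (String × Int) => ix.2.1 == g)
      (f := fun ix : Int × (String × Int) => (ix.1, ix.2.2))]
    simp [List.filter_map, Function.comp_def]
  rw [htot]
  have hnd : (List.foldl (fun (d : PySem.Dict String Int) ix =>
      d.insert ix.2.1 (d.getD ix.2.1 0 + ix.2.2)) PySem.Dict.empty
      (PySem.List.enumerate (genres.zip plays))).keys.Nodup :=
    PySem.Dict.nodup_keys_foldl_insert_key (PySem.List.enumerate (genres.zip plays))
      (fun ix : Int × (String × Int) => ix.2.1)
      (fun d ix => d.getD ix.2.1 0 + ix.2.2) PySem.Dict.empty PySem.Dict.nodup_keys_empty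
  rw [PySem.Dict.items_eq_map_keys _ hnd 0]
  rw [pv_sorted_map (fun k => (k, (List.foldl (fun (d : PySem.Dict String Int) ix =>
        d.insert ix.2.1 (d.getD ix.2.1 0 + ix.2.2)) PySem.Dict.empty
        (PySem.List.enumerate (genres.zip plays))).getD k 0))
      (fun k => (List.foldl (fun (d : PySem.Dict String Int) ix =>
        d.insert ix.2.1 (d.getD ix.2.1 0 + ix.2.2)) PySem.Dict.empty
        (PySem.List.enumerate (genres.zip plays))).getD k 0)
      (fun x => x.2) (fun a => rfl) _ true]
  rw [List.foldl_map]
  refine PySem.List.foldl_congr_mem _ _ _ _ ?_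
  intro acc k _
  simp only []
  rw [htemp k]
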